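-- pv_equiv track=rewrite | github.com/hodkhan/hodkhan | crawlers/crawler.py | determine_primary_video
-- ===== SOURCE A (Python) =====
-- def determine_primary_video(video_urls, html):
--     if not video_urls:
--         return '', 0
--     if len(video_urls) == 1:
--         return video_urls[0], 1 if '/embed' in video_urls[0] else 0
--     min_offset = float('inf')
--     primary_video = ''
--     for url in video_urls:
--         offset = html.find(url)
--         if offset != -1 and offset < min_offset:
--             min_offset = offset
--             primary_video = url
--     return primary_video, 1 if '/embed' in primary_video else 0
-- ===== SOURCE B (Python) =====
-- def determine_primary_video(video_urls, html):
--     if not video_urls: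
--         return '', 0
--     if len(video_urls) == 1:
--         return video_urls[0], 1 if '/embed' in video_urls[0] else 0
--     # single left-to-right scan over html positions: the first position where
--     # some url starts is the minimal offset; the first url (in list order)
--     # starting there is the tie-break winner.
--     for i in range(len(html) + 1):
--         for url in video_urls:
--             if html.startswith(url, i):
--                 return url, 1 if '/embed' in url else 0
--     return '', 0
-- ===== Notes on version B (the rewrite author's own statement) =====
-- stated objective: alternative
-- what changed: A minimizes html.find(url) over the urls; B makes one left-to-right scan over html positions and returns at the first position where some url starts (first url in list order on ties), so the per-url full-text find calls disappear.
import Mathlib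
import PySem

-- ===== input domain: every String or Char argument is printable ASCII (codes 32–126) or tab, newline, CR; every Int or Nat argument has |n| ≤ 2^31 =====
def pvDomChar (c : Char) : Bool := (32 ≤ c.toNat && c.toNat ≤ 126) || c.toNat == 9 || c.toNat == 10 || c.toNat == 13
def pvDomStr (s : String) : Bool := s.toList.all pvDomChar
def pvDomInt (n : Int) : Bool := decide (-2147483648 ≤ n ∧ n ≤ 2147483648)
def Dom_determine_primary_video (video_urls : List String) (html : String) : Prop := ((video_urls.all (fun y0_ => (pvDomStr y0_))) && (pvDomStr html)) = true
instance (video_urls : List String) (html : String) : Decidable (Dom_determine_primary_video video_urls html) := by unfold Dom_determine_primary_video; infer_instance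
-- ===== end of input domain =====

-- B replaces A's per-url html.find minimization by a single left-to-right scan over html
-- positions, returning at the first position where some url starts (objective: alternative).

-- ===== PORT A =====
-- loop body of A; min_offset = float('inf') is modelled as `none`
def pvStepA (html : String) (st : Option Int × String) (url : String) : Option Int × String :=
  let offset := PySem.Str.find html url
  match st.1 with
  | none => if offset ≠ -1 then (some offset, url) else st
  | some m => if offset ≠ -1 ∧ offset < m then (some offset, url) else st

def determine_primary_video (video_urls : List String) (html : String) : String × Int :=
  if video_urls = [] then ("", 0)
  else if video_urls.length = 1 then
    (video_urls.headI, if PySem.Str.isIn "/embed" video_urls.headI then 1 else 0)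
  else
    let st := video_urls.foldl (pvStepA html) (none, "")
    (st.2, if PySem.Str.isIn "/embed" st.2 then 1 else 0)


-- ===== PORT B =====
-- html.startswith(url, i) for 0 ≤ i ≤ len(html) is exactly: url is a prefix of html[i:]
def pvMatchAt (video_urls : List String) (html : List Char) (i : Nat) : Option String :=
  video_urls.find? (fun u => PySem.Chars.startswith (html.drop i) u.toList)

def pvScan (video_urls : List String) (html : List Char) : Nat → Nat → Option String
  | _, 0 => none
  | i, fuel+1 =>
    match pvMatchAt video_urls html i with
    | some u => some u
    | none => pvScan video_urls html (i+1) fuel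

def determine_primary_video_alt (video_urls : List String) (html : String) : String × Int :=
  if video_urls = [] then ("", 0)
  else if video_urls.length = 1 then
    (video_urls.headI, if PySem.Str.isIn "/embed" video_urls.headI then 1 else 0)
  else
    match pvScan video_urls html.toList 0 (html.toList.length + 1) with
    | some u => (u, if PySem.Str.isIn "/embed" u then 1 else 0)
    | none => ("", 0)

-- ===== PRECONDITION & SPEC =====
def Spec_determine_primary_video (video_urls : List String) (html : String) (out : String × Int) : Prop := out = determine_primary_video_alt video_urls html
instance (video_urls : List String) (html : String) (out : String × Int) : Decidable (Spec_determine_primary_video video_urls html out) := by unfold Spec_determine_primary_video; infer_instance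

-- ===== CLAIM (what is proved, stated in full; the proofs are below) =====
def Claim_equal_determine_primary_video : Prop := ∀ (video_urls : List String) (html : String), Dom_determine_primary_video video_urls html → Spec_determine_primary_video video_urls html (determine_primary_video video_urls html)

-- ===== LEMMAS AND PROOFS =====

-- right-recursive characterisation of A's fold: (minimal offset, first url attaining it)
def pvAres (H : List Char) : List String → Option Int × String
  | [] => (none, "")
  | u :: l =>
    let r := pvAres H l
    let o := PySem.Chars.find H u.toList
    match r.1 with
    | none => if o ≠ -1 then (some o, u) else r
    | some m => if o ≠ -1 ∧ o ≤ m then (some o, u) else r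

theorem pvFoldA_some (html : String) :
    ∀ (l : List String) (m : Int) (p : String),
      List.foldl (pvStepA html) (some m, p) l =
        match (pvAres html.toList l).1 with
        | none => (some m, p)
        | some m' => if m' < m then pvAres html.toList l else (some m, p) := by
  intro l
  induction l with
  | nil => intro m p; simp [pvAres]
  | cons u l ih =>
    intro m p
    simp only [List.foldl_cons, pvStepA, pvAres, PySem.Str.find_eq]
    rcases hr : (pvAres html.toList l).1 with _ | m'
    · by_cases ho : PySem.Chars.find html.toList u.toList = -1
      · simp [ho, hr, ih]
      · simp only [ho, hr, ne_eq, not_false_eq_true, if_true, ite_true, true_and]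
        by_cases h3 : PySem.Chars.find html.toList u.toList < m
        · rw [if_pos h3, ih]; simp [hr, h3]
        · rw [if_neg h3, ih]; simp [hr]
    · by_cases ho : PySem.Chars.find html.toList u.toList = -1
      · simp only [ho, hr]
        simp only [neg_neg, ne_eq, not_true_eq_false, false_and, if_false, ite_false]
        rw [ih, hr]
      · by_cases hle : PySem.Chars.find html.toList u.toList ≤ m'
        · simp only [ho, hr, ne_eq, not_false_eq_true, true_and, hle, if_true, ite_true]
          by_cases h3 : PySem.Chars.find html.toList u.toList < m
          · rw [if_pos h3, ih, hr]
            have : ¬ m' < PySem.Chars.find html.toList u.toList := by omega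
            simp [this]
          · rw [if_neg h3, ih, hr]
            have : ¬ m' < m := by omega
            simp [this]
        · simp only [ho, hr, ne_eq, not_false_eq_true, true_and, hle, if_false, ite_false]
          by_cases h3 : PySem.Chars.find html.toList u.toList < m
          · have h4 : m' < PySem.Chars.find html.toList u.toList := by omega
            have h5 : m' < m := by omega
            rw [if_pos h3, ih, hr]
            simp [h4, h5]
          · rw [if_neg h3, ih, hr]

theorem pvAres_none (H : List Char) (l : List String) (h : (pvAres H l).1 = none) :
    pvAres H l = (none, "") ∧ ∀ u ∈ l, PySem.Chars.find H u.toList = -1 := by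
  induction l with
  | nil => simp [pvAres]
  | cons u l ih =>
    simp only [pvAres] at h ⊢
    rcases hr : (pvAres H l).1 with _ | m'
    · by_cases ho : PySem.Chars.find H u.toList = -1
      · simp only [hr, ho] at h ⊢
        simp only [neg_neg, ne_eq, not_true_eq_false, if_false, ite_false] at h ⊢
        rcases ih h with ⟨h1, h2⟩
        refine ⟨h1, ?_⟩
        intro v hv
        rcases List.mem_cons.mp hv with hv | hv
        · simpa [hv] using ho
        · exact h2 v hv
      · simp [hr, ho] at h
    · simp only [hr] at h
      by_cases ho : PySem.Chars.find H u.toList = -1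
      · simp only [ho] at h
        simp only [neg_neg, ne_eq, not_true_eq_false, false_and, if_false, ite_false] at h
        rw [hr] at h; cases h
      · by_cases hle : PySem.Chars.find H u.toList ≤ m'
        · simp [ho, hle] at h
        · simp only [ho, hle, ne_eq, not_false_eq_true, true_and, if_false, ite_false] at h
          rw [hr] at h; cases h

theorem pvFoldA_eq (html : String) (l : List String) :
    List.foldl (pvStepA html) (none, "") l = pvAres html.toList l := by
  induction l with
  | nil => simp [pvAres]
  | cons u l ih =>
    simp only [List.foldl_cons, pvStepA, pvAres, PySem.Str.find_eq]
    by_cases ho : PySem.Chars.find html.toList u.toList = -1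
    · simp only [ho, neg_neg, ne_eq, not_true_eq_false, if_false, ite_false]
      rw [ih]
      rcases hr : (pvAres html.toList l).1 with _ | m' <;> simp [hr]
    · simp only [ho, ne_eq, not_false_eq_true, if_true, ite_true, true_and]
      rw [pvFoldA_some]
      rcases hr : (pvAres html.toList l).1 with _ | m'
      · have := (pvAres_none html.toList l hr).1
        simp [hr, this]
      · simp only [hr]
        by_cases hle : PySem.Chars.find html.toList u.toList ≤ m'
        · have : ¬ m' < PySem.Chars.find html.toList u.toList := by omega
          simp [hle, this]
        · have : m' < PySem.Chars.find html.toList u.toList := by omega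
          simp [hle, this]

theorem pvPrefix_drop (H : List Char) (u : String) (j : Nat)
    (h : u.toList <+: H.drop j) :
    PySem.Chars.find H u.toList ≠ -1 ∧ PySem.Chars.find H u.toList ≤ (j : Int) := by
  have hin : PySem.Chars.isIn u.toList H = true :=
    (PySem.Chars.exists_prefix_drop_iff_isIn u.toList H).mp ⟨j, h⟩
  have hne : PySem.Chars.find H u.toList ≠ -1 := by
    rw [PySem.Chars.find_ne_neg_one_iff]
    exact (PySem.Chars.isIn_iff_infix u.toList H).mp hin
  refine ⟨hne, ?_⟩
  have h0 : 0 ≤ PySem.Chars.find H u.toList := by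
    rw [PySem.Chars.find_nonneg_iff]
    exact (PySem.Chars.isIn_iff_infix u.toList H).mp hin
  rcases PySem.Chars.find_spec h0 with ⟨_, hmin⟩
  by_contra hlt
  push_neg at hlt
  exact hmin j (by omega) h

theorem pvAres_some (H : List Char) (l : List String) (m : Int)
    (h : (pvAres H l).1 = some m) :
    0 ≤ m ∧ m ≤ H.length ∧
      (∀ u ∈ l, PySem.Chars.find H u.toList = -1 ∨ m ≤ PySem.Chars.find H u.toList) ∧
      l.find? (fun u => PySem.Chars.find H u.toList == m) = some (pvAres H l).2 := by
  induction l generalizing m with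
  | nil => simp [pvAres] at h
  | cons u l ih =>
    simp only [pvAres] at h ⊢
    rcases hr : (pvAres H l).1 with _ | m'
    · simp only [hr] at h ⊢
      by_cases ho : PySem.Chars.find H u.toList = -1
      · simp only [ho, neg_neg, ne_eq, not_true_eq_false, if_false, ite_false] at h
        rw [hr] at h; cases h
      · simp only [ho, ne_eq, not_false_eq_true, if_true, ite_true] at h ⊢
        obtain rfl : PySem.Chars.find H u.toList = m := by simpa using h
        have h0 : 0 ≤ PySem.Chars.find H u.toList :=
          (PySem.Chars.find_nonneg_iff _ _).mpr ((PySem.Chars.find_ne_neg_one_iff _ _).mp ho)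
        refine ⟨h0, PySem.Chars.find_le_length H u.toList, ?_, ?_⟩
        · intro v hv
          rcases List.mem_cons.mp hv with hv | hv
          · subst hv; omega
          · exact Or.inl ((pvAres_none H l hr).2 v hv)
        · simp
    · simp only [hr] at h ⊢
      by_cases ho : PySem.Chars.find H u.toList = -1
      · simp only [ho, neg_neg, ne_eq, not_true_eq_false, false_and, if_false, ite_false] at h ⊢
        rw [hr] at h
        obtain rfl : m' = m := by simpa using h
        rcases ih _ hr with ⟨h0, hlen, hall, hfind⟩
        refine ⟨h0, hlen, ?_, ?_⟩
        · intro v hv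
          rcases List.mem_cons.mp hv with hv | hv
          · subst hv; exact Or.inl ho
          · exact hall v hv
        · have : (PySem.Chars.find H u.toList == m') = false := by
            simp [ho]; omega
          simp [List.find?_cons, this, hfind]
      · by_cases hle : PySem.Chars.find H u.toList ≤ m'
        · simp only [ho, hle, ne_eq, not_false_eq_true, true_and, if_true, ite_true, and_true] at h ⊢
          obtain rfl : PySem.Chars.find H u.toList = m := by simpa using h
          have h0 : 0 ≤ PySem.Chars.find H u.toList :=
            (PySem.Chars.find_nonneg_iff _ _).mpr ((PySem.Chars.find_ne_neg_one_iff _ _).mp ho)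
          refine ⟨h0, PySem.Chars.find_le_length H u.toList, ?_, ?_⟩
          · intro v hv
            rcases List.mem_cons.mp hv with hv | hv
            · subst hv; omega
            · rcases (ih _ hr).2.2.1 v hv with hv1 | hv1
              · exact Or.inl hv1
              · exact Or.inr (by omega)
          · simp
        · simp only [ho, hle, ne_eq, not_false_eq_true, true_and, if_false, ite_false] at h ⊢
          rw [hr] at h
          obtain rfl : m' = m := by simpa using h
          rcases ih _ hr with ⟨h0, hlen, hall, hfind⟩
          refine ⟨h0, hlen, ?_, ?_⟩
          · intro v hv
            rcases List.mem_cons.mp hv with hv | hv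
            · subst hv; exact Or.inr (by omega)
            · exact hall v hv
          · have : (PySem.Chars.find H u.toList == m') = false := by
              simp; omega
            simp [List.find?_cons, this, hfind]

theorem pvScan_none (H : List Char) (l : List String)
    (hall : ∀ u ∈ l, PySem.Chars.find H u.toList = -1) :
    ∀ (fuel i : Nat), pvScan l H i fuel = none := by
  intro fuel
  induction fuel with
  | zero => intro i; rfl
  | succ fuel ih =>
    intro i
    have hm : pvMatchAt l H i = none := by
      rw [pvMatchAt, List.find?_eq_none]
      intro u hu hsw
      have hpre := (PySem.Chars.startswith_iff _ _).mp hsw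
      exact (pvPrefix_drop H u i hpre).1 (hall u hu)
    simp [pvScan, hm, ih]

theorem pvFind?_congr {α : Type} (p q : α → Bool) :
    ∀ l : List α, (∀ x ∈ l, p x = q x) → l.find? p = l.find? q := by
  intro l
  induction l with
  | nil => intro _; rfl
  | cons x l ih =>
    intro h
    have hx := h x (List.mem_cons_self)
    rw [List.find?_cons, List.find?_cons, hx, ih (fun y hy => h y (List.mem_cons_of_mem x hy))]

theorem pvScan_hit (H : List Char) (l : List String) (m : Int) (h0 : 0 ≤ m)
    (hm : ∀ u ∈ l, PySem.Chars.find H u.toList = -1 ∨ m ≤ PySem.Chars.find H u.toList)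
    (u₀ : String) (hu₀ : u₀ ∈ l) (hf : PySem.Chars.find H u₀.toList = m) :
    ∀ (fuel i : Nat), i ≤ m.toNat → m.toNat < i + fuel →
      pvScan l H i fuel = l.find? (fun u => PySem.Chars.find H u.toList == m) := by
  have hpt : ∀ u ∈ l, (PySem.Chars.startswith (H.drop m.toNat) u.toList)
      = (PySem.Chars.find H u.toList == m) := by
    intro u hu
    by_cases hp : u.toList <+: H.drop m.toNat
    · have h1 := pvPrefix_drop H u m.toNat hp
      have : PySem.Chars.find H u.toList = m := by
        rcases hm u hu with hc | hc
        · exact absurd hc h1.1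
        · omega
      simp [this, (PySem.Chars.startswith_iff _ _).mpr hp]
    · have : PySem.Chars.find H u.toList ≠ m := by
        intro he
        have h2 : 0 ≤ PySem.Chars.find H u.toList := by omega
        rcases PySem.Chars.find_spec h2 with ⟨hpre, _⟩
        rw [he] at hpre
        exact hp hpre
      have hs : PySem.Chars.startswith (H.drop m.toNat) u.toList = false := by
        rw [← Bool.not_eq_true]
        intro hsw
        exact hp ((PySem.Chars.startswith_iff _ _).mp hsw)
      simp [hs, this]
  intro fuel
  induction fuel with
  | zero => intro i h1 h2; omega
  | succ fuel ih =>
    intro i h1 h2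
    by_cases hi : i = m.toNat
    · subst hi
      have hMA : pvMatchAt l H m.toNat = l.find? (fun u => PySem.Chars.find H u.toList == m) := by
        rw [pvMatchAt]
        exact pvFind?_congr _ _ l hpt
      rcases hq : l.find? (fun u => PySem.Chars.find H u.toList == m) with _ | u
      · exfalso
        have := List.find?_eq_none.mp hq u₀ hu₀
        simp [hf] at this
      · rw [pvScan, hMA, hq]
    · have hlt : i < m.toNat := by omega
      have hnone : pvMatchAt l H i = none := by
        rw [pvMatchAt, List.find?_eq_none]
        intro u hu hsw
        have h1' := pvPrefix_drop H u i ((PySem.Chars.startswith_iff _ _).mp hsw)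
        rcases hm u hu with hc | hc
        · exact h1'.1 hc
        · have : (i : Int) < m := by omega
          omega
      rw [pvScan, hnone]
      exact ih (i+1) (by omega) (by omega)

theorem main_eq (video_urls : List String) (html : String) :
    determine_primary_video video_urls html = determine_primary_video_alt video_urls html := by
  unfold determine_primary_video determine_primary_video_alt
  by_cases h1 : video_urls = []
  · simp [h1]
  · simp only [h1, if_false]
    by_cases h2 : video_urls.length = 1
    · simp [h2]
    · simp only [h2, if_false]
      rw [pvFoldA_eq]
      rcases hr : (pvAres html.toList video_urls).1 with _ | m
      · rcases pvAres_none html.toList video_urls hr with ⟨heq, hall⟩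
        rw [heq, pvScan_none html.toList video_urls hall _ 0]
        simp
        decide
      · rcases pvAres_some html.toList video_urls m hr with ⟨h0, hlen, hall, hfind⟩
        have hu₀mem := List.mem_of_find?_eq_some hfind
        have hu₀p := List.find?_some hfind
        have hf : PySem.Chars.find html.toList (pvAres html.toList video_urls).2.toList = m := by
          simpa using hu₀p
        rw [pvScan_hit html.toList video_urls m h0 hall _ hu₀mem hf
          (html.toList.length + 1) 0 (by omega) (by omega), hfind]

-- ===== VERDICT (by name: the statement is the Claim_ definition above) =====
theorem determine_primary_video_spec : Claim_equal_determine_primary_video := by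
  intro video_urls html _
  exact main_eq video_urls html
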